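-- pv_equiv track=rewrite | github.com/maishapatodia11/Composers-Assistant---Python | Composer's Assistant - Final Project/Code/main.py | midiscaleweight
-- ===== SOURCE A (Python) =====
-- def midiscaleweight(scalelist):             # makes a list of probablities of each MIDI number (favours tonic, dominant and subdominant)
--     scaleweight = []
--
--     for i in range(1,(len(scalelist)+1)):   # spans length of scale list
--         if i == 1 or (i-1)%7 == 0 :         # based on the position in the list (i), a probability is assigned
--             scaleweight.append(30)
--         elif (i+3)%7 == 0 :
--             scaleweight.append(14)
--         elif (i+2)%7 == 0 :
--             scaleweight.append(20)
--         else :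
--             scaleweight.append(9)
--     return scaleweight
-- ===== SOURCE B (Python) =====
-- # Tile-and-truncate: repeat the period-7 block enough times, then cut to length.
-- # No per-element loop, branch or index arithmetic at all.
-- def midiscaleweight(scalelist):
--     n = len(scalelist)
--     block = [30, 9, 9, 14, 20, 9, 9]
--     return (block * (n // 7 + 1))[:n]
-- ===== Notes on version B (the rewrite author's own statement) =====
-- stated objective: faster
-- what changed: Instead of A's per-index loop with a four-way modular branch cascade, B never inspects indices: it concatenates enough copies of the fixed period-7 weight block with list repetition and truncates the tiled list to the input length.
import Mathlib
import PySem

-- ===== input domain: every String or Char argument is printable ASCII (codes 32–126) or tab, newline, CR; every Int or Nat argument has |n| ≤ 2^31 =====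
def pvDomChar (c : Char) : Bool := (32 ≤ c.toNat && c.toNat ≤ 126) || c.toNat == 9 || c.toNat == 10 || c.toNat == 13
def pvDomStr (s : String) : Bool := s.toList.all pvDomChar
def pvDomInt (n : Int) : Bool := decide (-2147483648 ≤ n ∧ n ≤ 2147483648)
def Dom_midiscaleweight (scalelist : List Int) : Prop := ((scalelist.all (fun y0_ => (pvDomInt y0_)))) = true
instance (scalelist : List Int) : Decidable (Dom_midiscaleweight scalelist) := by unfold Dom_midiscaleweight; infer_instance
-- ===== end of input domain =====

-- B never inspects indices: it tiles the fixed period-7 weight block and truncates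
-- to the input length, replacing A's per-index modular branch cascade (simpler).

-- ===== PORT A =====
def midiscaleweight (scalelist : List Int) : List Int :=
  (PySem.List.pyRange 1 ((scalelist.length : Int) + 1) 1).foldl
    (fun scaleweight i =>
      if i = 1 ∨ PySem.Int.mod (i - 1) 7 = 0 then scaleweight ++ [30]
      else if PySem.Int.mod (i + 3) 7 = 0 then scaleweight ++ [14]
      else if PySem.Int.mod (i + 2) 7 = 0 then scaleweight ++ [20]
      else scaleweight ++ [9])
    []

-- ===== PORT B =====
-- block * (n // 7 + 1) is replicate-then-flatten; [:n] with n = len ≥ 0 is take n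
def midiscaleweight_alt (scalelist : List Int) : List Int :=
  let n := scalelist.length
  let block : List Int := [30, 9, 9, 14, 20, 9, 9]
  ((List.replicate (n / 7 + 1) block).flatten).take n

-- ===== PRECONDITION & SPEC =====
def Spec_midiscaleweight (scalelist : List Int) (out : List Int) : Prop := out = midiscaleweight_alt scalelist
instance (scalelist : List Int) (out : List Int) : Decidable (Spec_midiscaleweight scalelist out) := by unfold Spec_midiscaleweight; infer_instance

-- ===== CLAIM (what is proved, stated in full; the proofs are below) =====
def Claim_equal_midiscaleweight : Prop := ∀ (scalelist : List Int), Dom_midiscaleweight scalelist → Spec_midiscaleweight scalelist (midiscaleweight scalelist)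

-- ===== LEMMAS AND PROOFS =====

def pvW : List Int := [30, 9, 9, 14, 20, 9, 9]

-- A's branch value at loop index i = 1 + k equals the block entry at k % 7
theorem pv_cell (k : Nat) :
    (if (1 + (k : Int)) = 1 ∨ PySem.Int.mod ((1 + (k : Int)) - 1) 7 = 0 then ([30] : List Int)
     else if PySem.Int.mod ((1 + (k : Int)) + 3) 7 = 0 then [14]
     else if PySem.Int.mod ((1 + (k : Int)) + 2) 7 = 0 then [20]
     else [9])
    = [pvW.getD (k % 7) 9] := by
  have hm : ∀ a : Int, PySem.Int.mod a 7 = a % 7 :=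
    fun a => PySem.Int.mod_eq_emod_of_pos (by norm_num)
  simp only [hm]
  split_ifs with h1 h2 h3
  · have h : k % 7 = 0 := by omega
    simp [h, pvW]
  · have h : k % 7 = 3 := by omega
    simp [h, pvW]
  · have h : k % 7 = 4 := by omega
    simp [h, pvW]
  · have h : k % 7 = 1 ∨ k % 7 = 2 ∨ k % 7 = 5 ∨ k % 7 = 6 := by omega
    rcases h with h | h | h | h <;> simp [h, pvW]

-- A's loop over range(1, n+1) produces the index-lookup form
theorem pv_A_eq_map (n : Nat) :
    (PySem.List.pyRange 1 ((n : Int) + 1) 1).foldl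
      (fun scaleweight i =>
        if i = 1 ∨ PySem.Int.mod (i - 1) 7 = 0 then scaleweight ++ [30]
        else if PySem.Int.mod (i + 3) 7 = 0 then scaleweight ++ [14]
        else if PySem.Int.mod (i + 2) 7 = 0 then scaleweight ++ [20]
        else scaleweight ++ [9])
      []
    = (List.range n).map (fun i => pvW.getD (i % 7) 9) := by
  induction n with
  | zero => simp [PySem.List.pyRange_one_eq_nil]
  | succ m ih =>
    have hsplit : PySem.List.pyRange 1 (((m + 1 : Nat) : Int) + 1) 1
        = PySem.List.pyRange 1 ((m : Int) + 1) 1 ++ [(m : Int) + 1] := by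
      have := PySem.List.pyRange_one_succ_right (a := 1) (b := (m : Int) + 1) (by omega)
      push_cast
      exact this
    rw [hsplit, List.foldl_append, ih, List.range_succ, List.map_append]
    simp only [List.foldl_cons, List.foldl_nil, List.map_cons, List.map_nil]
    have e1 : (m : Int) + 1 = 1 + (m : Int) := by ring
    rw [e1, ← pv_cell m]
    split_ifs <;> rfl

-- the tiled list of m copies of the block is the index-lookup form over 7*m indices
theorem pv_tile_eq (m : Nat) :
    (List.replicate m pvW).flatten
    = (List.range (7 * m)).map (fun i => pvW.getD (i % 7) 9) := by
  induction m with
  | zero => simp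
  | succ k ih =>
    rw [List.replicate_succ', List.flatten_append, ih]
    have h7 : 7 * (k + 1) = 7 * k + 7 := by ring
    rw [h7, List.range_add, List.map_append]
    congr 1
    have hmod : List.map ((fun i => pvW.getD (i % 7) 9) ∘ fun x => 7 * k + x) (List.range 7)
        = List.map (fun j => pvW.getD (j % 7) 9) (List.range 7) := by
      refine List.map_congr_left ?_
      intro j hj
      simp only [Function.comp]
      congr 1
      omega
    rw [List.map_map, hmod]
    decide

-- B's tile-and-truncate equals the index-lookup form over n indices
theorem pv_B_eq_map (n : Nat) :
    ((List.replicate (n / 7 + 1) pvW).flatten).take n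
    = (List.range n).map (fun i => pvW.getD (i % 7) 9) := by
  rw [pv_tile_eq, ← List.map_take, List.take_range]
  have : min n (7 * (n / 7 + 1)) = n := by omega
  rw [this]

-- ===== VERDICT (by name: the statement is the Claim_ definition above) =====
theorem midiscaleweight_spec : Claim_equal_midiscaleweight := by
  intro scalelist _
  unfold Spec_midiscaleweight midiscaleweight midiscaleweight_alt
  simp only []
  rw [pv_A_eq_map scalelist.length]
  exact (pv_B_eq_map scalelist.length).symm
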